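-- pv_equiv track=rewrite | github.com/PayasPandey11/gitwise | gitwise/features/changelog.py | categorize_changes
-- ===== SOURCE A (Python) =====
-- from typing import List, Dict, Optional, Tuple, NamedTuple
--
-- def categorize_changes(commits: List[Dict[str, str]]) -> Dict[str, List[Dict[str, str]]]:
--     """Categorize commits by type.
--
--     Args:
--         commits: List of commit dictionaries.
--
--     Returns:
--         Dictionary mapping commit types to lists of commits.
--     """
--     categories = {
--         "Features": [],
--         "Bug Fixes": [],
--         "Documentation": [],
--         "Style": [],
--         "Refactor": [],
--         "Performance": [],
--         "Tests": [],
--         "Chores": [],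
--         "Other": []
--     }
--
--     type_mapping = {
--         "feat": "Features",
--         "fix": "Bug Fixes",
--         "docs": "Documentation",
--         "style": "Style",
--         "refactor": "Refactor",
--         "perf": "Performance",
--         "test": "Tests",
--         "chore": "Chores"
--     }
--
--     for commit in commits:
--         message = commit["message"]
--         # Check for conventional commit format
--         if ":" in message:
--             type_ = message.split(":")[0].lower()
--             if type_ in type_mapping:
--                 categories[type_mapping[type_]].append(commit)
--                 continue
--         categories["Other"].append(commit)
--
--     return categories
-- ===== SOURCE B (Python) =====
-- def categorize_changes(commits):
--     """Categorize commits by type, built per category: one filter pass per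
--     output label (mapped labels in order, then the 'Other' complement)."""
--     type_mapping = {
--         "feat": "Features",
--         "fix": "Bug Fixes",
--         "docs": "Documentation",
--         "style": "Style",
--         "refactor": "Refactor",
--         "perf": "Performance",
--         "test": "Tests",
--         "chore": "Chores"
--     }
--
--     def key(commit):
--         message = commit["message"]
--         if ":" in message:
--             t = message.split(":")[0].lower()
--             if t in type_mapping:
--                 return type_mapping[t]
--         return "Other"
--
--     categories = {label: [c for c in commits if key(c) == label]
--                   for label in type_mapping.values()}
--     categories["Other"] = [c for c in commits if key(c) == "Other"]
--     return categories
-- ===== Notes on version B (the rewrite author's own statement) =====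
-- stated objective: alternative
-- what changed: B builds the result grouped by output category (a dict comprehension with one filter pass of the commit list per label, plus the 'Other' complement) instead of A's single pass that dispatches each commit into a mutable bucket dict.
import Mathlib
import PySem

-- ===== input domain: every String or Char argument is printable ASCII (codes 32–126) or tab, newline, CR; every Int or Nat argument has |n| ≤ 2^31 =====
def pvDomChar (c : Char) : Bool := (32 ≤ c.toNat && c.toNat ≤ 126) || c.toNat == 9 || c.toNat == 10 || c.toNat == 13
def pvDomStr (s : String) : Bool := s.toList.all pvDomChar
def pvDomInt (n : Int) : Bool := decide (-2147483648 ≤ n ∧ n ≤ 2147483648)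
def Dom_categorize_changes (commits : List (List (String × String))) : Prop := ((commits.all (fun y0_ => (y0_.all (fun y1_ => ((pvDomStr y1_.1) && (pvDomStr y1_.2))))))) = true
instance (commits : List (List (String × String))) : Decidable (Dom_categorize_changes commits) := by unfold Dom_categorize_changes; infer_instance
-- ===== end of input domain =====

-- B builds the result per output category (one filter pass per label, then the
-- 'Other' complement) instead of A's single dispatch loop into a mutable bucket dict.

-- the conventional-commit type mapping (same literal data in both Pythons)
def pvTM : List (String × String) :=
  [("feat", "Features"), ("fix", "Bug Fixes"), ("docs", "Documentation"),
   ("style", "Style"), ("refactor", "Refactor"), ("perf", "Performance"),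
   ("test", "Tests"), ("chore", "Chores")]

-- ===== PORT A =====
def categorize_changes (commits : List (List (String × String))) : List (String × List (List (String × String))) :=
  let categories : PySem.Dict String (List (List (String × String))) :=
    PySem.Dict.ofList
      [("Features", []), ("Bug Fixes", []), ("Documentation", []), ("Style", []),
       ("Refactor", []), ("Performance", []), ("Tests", []), ("Chores", []), ("Other", [])]
  let categories := commits.foldl (fun cats commit =>
    -- message = commit["message"] (KeyError excluded by Pre_; first-match lookup)
    let message := (commit.lookup "message").getD ""
    if PySem.Str.isIn ":" message then
      let type_ := PySem.Str.lower (((PySem.Str.split? message ":").getD []).headD "")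
      match pvTM.lookup type_ with
      | some lbl => cats.modify lbl [] (fun l => l ++ [commit])   -- append then continue
      | none => cats.modify "Other" [] (fun l => l ++ [commit])
    else cats.modify "Other" [] (fun l => l ++ [commit])) categories
  categories.items

-- ===== PORT B =====
-- key(commit) of Source B
def pvKey (commit : List (String × String)) : String :=
  let message := (commit.lookup "message").getD ""
  if PySem.Str.isIn ":" message then
    let t := PySem.Str.lower (((PySem.Str.split? message ":").getD []).headD "")
    (pvTM.lookup t).getD "Other"
  else "Other"

def categorize_changes_alt (commits : List (List (String × String))) : List (String × List (List (String × String))) :=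
  (pvTM.map (fun p => (p.2, commits.filter (fun c => pvKey c == p.2))))
    ++ [("Other", commits.filter (fun c => pvKey c == "Other"))]

-- ===== PRECONDITION & SPEC =====
-- Pre_ excludes commits without a "message" key: there both A and B raise KeyError.
def Pre_categorize_changes (commits : List (List (String × String))) : Prop :=
  (commits.all (fun c => (c.lookup "message").isSome)) = true
instance (commits : List (List (String × String))) : Decidable (Pre_categorize_changes commits) := by unfold Pre_categorize_changes; infer_instance

def pvWitness_categorize_changes : (List (List (String × String))) :=
  [[("message", "feat: add parser")], [("message", "misc cleanup")]]

def Spec_categorize_changes (commits : List (List (String × String))) (out : List (String × List (List (String × String)))) : Prop := out = categorize_changes_alt commits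
instance (commits : List (List (String × String))) (out : List (String × List (List (String × String)))) : Decidable (Spec_categorize_changes commits out) := by unfold Spec_categorize_changes; infer_instance

-- ===== CLAIM (what is proved, stated in full; the proofs are below) =====
def Claim_equal_categorize_changes : Prop := ∀ (commits : List (List (String × String))), Dom_categorize_changes commits → Pre_categorize_changes commits → Spec_categorize_changes commits (categorize_changes commits)

-- ===== LEMMAS AND PROOFS =====

-- A's loop body is exactly 'append the commit to the bucket named pvKey commit'
lemma stepA_eq (cats : PySem.Dict String (List (List (String × String))))
    (commit : List (String × String)) :
    (let message := (commit.lookup "message").getD ""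
     if PySem.Str.isIn ":" message then
       let type_ := PySem.Str.lower (((PySem.Str.split? message ":").getD []).headD "")
       match pvTM.lookup type_ with
       | some lbl => cats.modify lbl [] (fun l => l ++ [commit])
       | none => cats.modify "Other" [] (fun l => l ++ [commit])
     else cats.modify "Other" [] (fun l => l ++ [commit]))
    = cats.modify (pvKey commit) [] (fun l => l ++ [commit]) := by
  unfold pvKey
  by_cases h : PySem.Str.isIn ":" ((commit.lookup "message").getD "") = true
  · rw [if_pos h, if_pos h]
    cases hl : pvTM.lookup (PySem.Str.lower
        (((PySem.Str.split? ((commit.lookup "message").getD "") ":").getD []).headD "")) <;>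
      simp only [List.headD_eq_head?_getD] at hl <;> simp [hl]
  · rw [if_neg h, if_neg h]

lemma lookup_mem_snd {α β : Type} [BEq α] (l : List (α × β)) (k : α) (v : β)
    (h : l.lookup k = some v) : v ∈ l.map Prod.snd := by
  induction l with
  | nil => simp [List.lookup] at h
  | cons p rest ih =>
    rw [List.lookup] at h
    by_cases hk : (k == p.1) = true
    · simp [hk] at h; simp [h]
    · simp [hk] at h; simp [ih h]

lemma pvKey_mem (c : List (String × String)) :
    pvKey c ∈ ["Features", "Bug Fixes", "Documentation", "Style", "Refactor",
               "Performance", "Tests", "Chores", "Other"] := by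
  unfold pvKey
  by_cases h : PySem.Str.isIn ":" ((c.lookup "message").getD "") = true
  · rw [if_pos h]
    cases hl : pvTM.lookup (PySem.Str.lower
        (((PySem.Str.split? ((c.lookup "message").getD "") ":").getD []).headD "")) with
    | none =>
      simp only [List.headD_eq_head?_getD] at hl
      simp [hl]
    | some v =>
      have := lookup_mem_snd _ _ _ hl
      simp only [List.headD_eq_head?_getD] at hl
      simp [pvTM] at this
      rcases this with h | h | h | h | h | h | h | h <;> simp [hl, h]
  · rw [if_neg h]; simp

-- the bucket-appending fold, described item-wise by per-key filters
lemma fold_items (commits : List (List (String × String)))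
    (d : PySem.Dict String (List (List (String × String))))
    (hnd : d.keys.Nodup)
    (hmem : ∀ c ∈ commits, pvKey c ∈ d.keys) :
    (commits.foldl (fun cats c => cats.modify (pvKey c) [] (fun l => l ++ [c])) d).items
      = d.items.map (fun p => (p.1, p.2 ++ commits.filter (fun c => pvKey c == p.1))) := by
  induction commits generalizing d with
  | nil => simp
  | cons c rest ih =>
    have hc : d.contains (pvKey c) = true := by
      rw [PySem.Dict.contains_iff_mem_keys]; exact hmem c (by simp)
    have hstep : (d.modify (pvKey c) [] (fun l => l ++ [c])).items
        = d.items.map (fun p => if p.1 == pvKey c then (pvKey c, p.2 ++ [c]) else p) := by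
      show (d.insert (pvKey c) _).items = _
      rw [PySem.Dict.items_insert_of_contains d _ hc]
      apply List.map_congr_left
      intro p hp
      by_cases hpk : (p.1 == pvKey c) = true
      · have hv : d.getD (pvKey c) [] = p.2 := by
          have hk : pvKey c = p.1 := (eq_of_beq hpk).symm
          rw [hk]
          exact PySem.Dict.getD_of_mem_items d (by simpa using hp) hnd []
        simp [hpk, hv]
      · simp [hpk]
    have hkeys : (d.modify (pvKey c) [] (fun l => l ++ [c])).keys = d.keys := by
      rw [PySem.Dict.keys_modify, PySem.Dict.keys_insert_of_contains _ _ hc]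
    rw [List.foldl_cons, ih _ (by rw [hkeys]; exact hnd)
        (by rw [hkeys]; exact fun x hx => hmem x (by simp [hx]))]
    rw [hstep, List.map_map]
    apply List.map_congr_left
    intro p hp
    by_cases hpk : (p.1 == pvKey c) = true
    · have hpk' : pvKey c = p.1 := (eq_of_beq hpk).symm
      simp only [Function.comp, hpk, if_true]
      simp [hpk']
    · simp only [Function.comp, hpk]
      have : (pvKey c == p.1) = false := by
        rw [beq_eq_false_iff_ne]
        intro h; exact hpk (by simp [h])
      simp [this]

-- ===== VERDICT (by name: the statement is the Claim_ definition above) =====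
theorem categorize_changes_spec : Claim_equal_categorize_changes := by
  intro commits _ _
  show categorize_changes commits = categorize_changes_alt commits
  have hbody : (commits.foldl (fun cats commit =>
      let message := (commit.lookup "message").getD ""
      if PySem.Str.isIn ":" message then
        let type_ := PySem.Str.lower (((PySem.Str.split? message ":").getD []).headD "")
        match pvTM.lookup type_ with
        | some lbl => cats.modify lbl [] (fun l => l ++ [commit])
        | none => cats.modify "Other" [] (fun l => l ++ [commit])
      else cats.modify "Other" [] (fun l => l ++ [commit]))
      (PySem.Dict.ofList
        [("Features", []), ("Bug Fixes", []), ("Documentation", []), ("Style", []),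
         ("Refactor", []), ("Performance", []), ("Tests", []), ("Chores", []), ("Other", [])]))
    = commits.foldl (fun cats c => cats.modify (pvKey c) [] (fun l => l ++ [c]))
      (PySem.Dict.ofList
        [("Features", []), ("Bug Fixes", []), ("Documentation", []), ("Style", []),
         ("Refactor", []), ("Performance", []), ("Tests", []), ("Chores", []), ("Other", [])]) := by
    apply PySem.List.foldl_congr_mem
    intro cats x _
    exact stepA_eq cats x
  have h1 : categorize_changes commits
      = (commits.foldl (fun cats c => cats.modify (pvKey c) [] (fun l => l ++ [c]))
          (PySem.Dict.ofList
            [("Features", []), ("Bug Fixes", []), ("Documentation", []), ("Style", []),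
             ("Refactor", []), ("Performance", []), ("Tests", []), ("Chores", []), ("Other", [])])).items := by
    simp only [categorize_changes]
    exact congrArg PySem.Dict.items hbody
  have hkeys9 : (PySem.Dict.ofList
      [("Features", ([] : List (List (String × String)))), ("Bug Fixes", []), ("Documentation", []), ("Style", []),
       ("Refactor", []), ("Performance", []), ("Tests", []), ("Chores", []), ("Other", [])]).keys
      = ["Features", "Bug Fixes", "Documentation", "Style", "Refactor",
         "Performance", "Tests", "Chores", "Other"] := by decide
  rw [h1, fold_items _ _ (by decide) (fun c _ => by rw [hkeys9]; exact pvKey_mem c)]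
  have hitems : (PySem.Dict.ofList
      [("Features", ([] : List (List (String × String)))), ("Bug Fixes", []), ("Documentation", []), ("Style", []),
       ("Refactor", []), ("Performance", []), ("Tests", []), ("Chores", []), ("Other", [])]).items
      = [("Features", []), ("Bug Fixes", []), ("Documentation", []), ("Style", []),
         ("Refactor", []), ("Performance", []), ("Tests", []), ("Chores", []), ("Other", [])] := by
    decide
  rw [hitems]
  simp [categorize_changes_alt, pvTM]
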